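-- pv_equiv track=rewrite | github.com/rohansx/cloakpipe | benchmarks/realworld_eval.py | count_pii_found
-- ===== SOURCE A (Python) =====
-- def count_pii_found(detected_texts: list[str], expected_pii: list[str]) -> tuple[int, list[str], list[str]]:
--     """Count how many expected PII items were found. Returns (found, found_list, missed_list)."""
--     found = []
--     missed = []
--     detected_lower = " ".join(detected_texts).lower()
--     for pii in expected_pii:
--         # Fuzzy: check if any substantial part of the PII appears in detections
--         pii_parts = pii.lower().split()
--         if any(part in detected_lower for part in pii_parts if len(part) > 2):
--             found.append(pii)
--         else:
--             missed.append(pii)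
--     return len(found), found, missed
-- ===== SOURCE B (Python) =====
-- def count_pii_found(detected_texts: list[str], expected_pii: list[str]) -> tuple[int, list[str], list[str]]:
--     """Count how many expected PII items were found. Returns (found, found_list, missed_list)."""
--     # Memoize each distinct part: a part shared by several PII items (or repeated
--     # within one) is searched for in the detections only once.
--     blob = " ".join(t.lower() for t in detected_texts)
--     keyed = [(pii, [p for p in pii.lower().split() if len(p) > 2]) for pii in expected_pii]
--     hit = {}
--     for _, parts in keyed:
--         for p in parts:
--             if p not in hit:
--                 hit[p] = p in blob
--     found = [pii for pii, parts in keyed if any(hit[p] for p in parts)]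
--     missed = [pii for pii, parts in keyed if not any(hit[p] for p in parts)]
--     return len(found), found, missed
-- ===== Notes on version B (the rewrite author's own statement) =====
-- stated objective: alternative
-- what changed: B splits each PII once into a precomputed (pii, parts) list, memoizes each distinct part's substring test in a dict built once (a part shared by several PII items is searched only once), and builds found/missed by filtering that list instead of A's accumulator loop that re-runs a substring scan for every part occurrence.
import Mathlib
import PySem

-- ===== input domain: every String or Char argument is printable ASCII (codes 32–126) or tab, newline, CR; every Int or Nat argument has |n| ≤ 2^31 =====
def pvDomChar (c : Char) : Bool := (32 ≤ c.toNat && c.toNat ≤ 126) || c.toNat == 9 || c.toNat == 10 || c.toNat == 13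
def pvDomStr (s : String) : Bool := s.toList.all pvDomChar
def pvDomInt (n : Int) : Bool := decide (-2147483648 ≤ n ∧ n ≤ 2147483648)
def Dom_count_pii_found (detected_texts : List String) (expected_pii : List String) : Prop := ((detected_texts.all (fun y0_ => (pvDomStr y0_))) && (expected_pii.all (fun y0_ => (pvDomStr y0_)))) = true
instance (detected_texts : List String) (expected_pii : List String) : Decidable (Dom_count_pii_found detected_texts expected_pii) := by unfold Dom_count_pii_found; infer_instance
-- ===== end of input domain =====

-- B memoizes each distinct length>2 part in a dict built once (shared parts are searched
-- only once), splits each PII once into a precomputed (pii, parts) list, and builds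
-- found/missed by filtering that list instead of A's accumulator loop re-testing the
-- joined text per part occurrence. Objective: alternative decomposition.

-- ===== PORT A =====
def count_pii_found (detected_texts : List String) (expected_pii : List String) : Int × List String × List String :=
  let detected_lower := PySem.Str.lower (PySem.Str.join " " detected_texts)
  let fm := expected_pii.foldl
    (fun (acc : List String × List String) pii =>
      let pii_parts := PySem.Str.split₀ (PySem.Str.lower pii)
      if ((pii_parts.filter (fun part => decide (2 < PySem.Str.len part))).any
            (fun part => PySem.Str.isIn part detected_lower))
      then (acc.1 ++ [pii], acc.2)
      else (acc.1, acc.2 ++ [pii]))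
    ([], [])
  ((fm.1.length : Int), fm.1, fm.2)

-- ===== PORT B =====
-- the list of length>2 parts of one PII item
def pvParts (pii : String) : List String :=
  (PySem.Str.split₀ (PySem.Str.lower pii)).filter (fun p => decide (2 < PySem.Str.len p))

-- the memo dict: each distinct part, looked up once against the blob
def pvHitMap (blob : String) (keyed : List (String × List String)) :
    PySem.Dict String Bool :=
  keyed.foldl (fun h kp =>
    kp.2.foldl (fun h p =>
      if !(PySem.Dict.contains h p)
      then PySem.Dict.insert h p (PySem.Str.isIn p blob)
      else h) h) PySem.Dict.empty

def count_pii_found_alt (detected_texts : List String) (expected_pii : List String) : Int × List String × List String :=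
  let blob := PySem.Str.join " " (detected_texts.map PySem.Str.lower)
  let keyed := expected_pii.map (fun pii => (pii, pvParts pii))
  let hit := pvHitMap blob keyed
  -- hit[p]: every queried p was inserted above, so the default is never used
  let found := (keyed.filter (fun kp => kp.2.any (fun p => PySem.Dict.getD hit p false))).map Prod.fst
  let missed := (keyed.filter (fun kp => !(kp.2.any (fun p => PySem.Dict.getD hit p false)))).map Prod.fst
  ((found.length : Int), found, missed)

-- ===== PRECONDITION & SPEC =====
def Spec_count_pii_found (detected_texts : List String) (expected_pii : List String) (out : Int × List String × List String) : Prop := out = count_pii_found_alt detected_texts expected_pii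
instance (detected_texts : List String) (expected_pii : List String) (out : Int × List String × List String) : Decidable (Spec_count_pii_found detected_texts expected_pii out) := by unfold Spec_count_pii_found; infer_instance

-- ===== CLAIM (what is proved, stated in full; the proofs are below) =====
def Claim_equal_count_pii_found : Prop := ∀ (detected_texts : List String) (expected_pii : List String), Dom_count_pii_found detected_texts expected_pii → Spec_count_pii_found detected_texts expected_pii (count_pii_found detected_texts expected_pii)

-- ===== LEMMAS AND PROOFS =====

-- lower() commutes with the " " join
theorem pv_lower_intercalate :
    ∀ ls : List (List Char),
      PySem.Chars.lower ([' '].intercalate ls) = [' '].intercalate (ls.map PySem.Chars.lower)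
  | [] => by simp [List.intercalate, PySem.Chars.lower]
  | [a] => by simp [List.intercalate, PySem.Chars.lower]
  | a :: b :: tl => by
    have hstep : [' '].intercalate (a :: b :: tl) = a ++ ' ' :: [' '].intercalate (b :: tl) := by
      simp [List.intercalate, List.intersperse]
    have hstep2 : [' '].intercalate ((a :: b :: tl).map PySem.Chars.lower)
        = PySem.Chars.lower a ++ ' ' :: [' '].intercalate ((b :: tl).map PySem.Chars.lower) := by
      simp [List.intercalate]
    rw [hstep, hstep2, ← pv_lower_intercalate (b :: tl)]
    have hsp : PySem.Chars.lowerChar ' ' = ' ' := by decide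
    simp [PySem.Chars.lower, hsp]

-- A's search string equals B's blob
theorem pv_blob_eq (detected_texts : List String) :
    PySem.Str.lower (PySem.Str.join " " detected_texts)
      = PySem.Str.join " " (detected_texts.map PySem.Str.lower) := by
  apply String.toList_inj.mp
  simp only [PySem.Str.lower, PySem.Str.join, PySem.Chars.join, String.toList_ofList,
    List.map_map]
  rw [show (" ".toList) = [' '] from rfl, pv_lower_intercalate]
  congr 1
  rw [List.map_map]
  apply List.map_congr_left
  intro t _
  simp [Function.comp, PySem.Str.lower, String.toList_ofList]

-- the fixed value B memoizes for a part
def pvF (blob : String) (p : String) : Bool := PySem.Str.isIn p blob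

-- invariant of the memo dict: every stored value is pvF of its key
def pvInv (blob : String) (h : PySem.Dict String Bool) : Prop :=
  ∀ k b, PySem.Dict.get? h k = some b → b = pvF blob k

theorem pv_inner_inv (blob : String) (parts : List String)
    (h : PySem.Dict String Bool) (hinv : pvInv blob h) :
    pvInv blob (parts.foldl (fun h p =>
      if !(PySem.Dict.contains h p)
      then PySem.Dict.insert h p (pvF blob p) else h) h) := by
  induction parts generalizing h with
  | nil => exact hinv
  | cons a tl ih =>
    rw [List.foldl_cons]
    apply ih
    by_cases hc : PySem.Dict.contains h a
    · simpa [hc] using hinv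
    · simp only [hc, Bool.not_false, if_pos]
      intro k b hk
      rcases eq_or_ne k a with rfl | hne
      · rw [PySem.Dict.get?_insert_self] at hk
        exact (Option.some_inj.mp hk).symm
      · rw [PySem.Dict.get?_insert_of_ne _ _ hne] at hk
        exact hinv k b hk

theorem pv_inner_contains (blob : String) (parts : List String)
    (h : PySem.Dict String Bool) (p : String)
    (hp : p ∈ parts ∨ PySem.Dict.contains h p = true) :
    PySem.Dict.contains (parts.foldl (fun h p =>
      if !(PySem.Dict.contains h p)
      then PySem.Dict.insert h p (pvF blob p) else h) h) p = true := by
  induction parts generalizing h with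
  | nil => exact hp.resolve_left (by simp)
  | cons a tl ih =>
    rw [List.foldl_cons]
    apply ih
    rcases hp with hp | hp
    · rcases List.mem_cons.mp hp with rfl | hp
      · right
        by_cases hc : PySem.Dict.contains h p
        · simp [hc]
        · simp [hc]
      · exact Or.inl hp
    · right
      by_cases hc : PySem.Dict.contains h a
      · simpa [hc] using hp
      · simp [hc, PySem.Dict.contains_insert, hp]

theorem pv_hitmap_inv (blob : String) (keyed : List (String × List String))
    (h : PySem.Dict String Bool) (hinv : pvInv blob h) :
    pvInv blob (keyed.foldl (fun h kp =>
      kp.2.foldl (fun h p =>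
        if !(PySem.Dict.contains h p)
        then PySem.Dict.insert h p (pvF blob p) else h) h) h) := by
  induction keyed generalizing h with
  | nil => exact hinv
  | cons a tl ih =>
    rw [List.foldl_cons]
    exact ih _ (pv_inner_inv blob a.2 h hinv)

theorem pv_outer_contains_mono (blob : String) (keyed : List (String × List String))
    (h : PySem.Dict String Bool) (p : String) (hc : PySem.Dict.contains h p = true) :
    PySem.Dict.contains (keyed.foldl (fun h kp =>
      kp.2.foldl (fun h p =>
        if !(PySem.Dict.contains h p)
        then PySem.Dict.insert h p (pvF blob p) else h) h) h) p = true := by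
  induction keyed generalizing h with
  | nil => exact hc
  | cons a tl ih =>
    rw [List.foldl_cons]
    exact ih _ (pv_inner_contains blob a.2 h p (Or.inr hc))

theorem pv_hitmap_contains (blob : String) (keyed : List (String × List String))
    (h : PySem.Dict String Bool) (kp : String × List String) (p : String)
    (hkp : kp ∈ keyed) (hp : p ∈ kp.2) :
    PySem.Dict.contains (keyed.foldl (fun h kp =>
      kp.2.foldl (fun h p =>
        if !(PySem.Dict.contains h p)
        then PySem.Dict.insert h p (pvF blob p) else h) h) h) p = true := by
  induction keyed generalizing h with
  | nil => exact absurd hkp (by simp)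
  | cons a tl ih =>
    rw [List.foldl_cons]
    rcases List.mem_cons.mp hkp with rfl | hkp
    · exact pv_outer_contains_mono blob tl _ p
        (pv_inner_contains blob kp.2 h p (Or.inl hp))
    · exact ih _ hkp

-- the memo lookup returns exactly pvF for every part that was inserted
theorem pv_hitmap_getD (blob : String) (keyed : List (String × List String))
    (kp : String × List String) (p : String) (hkp : kp ∈ keyed) (hp : p ∈ kp.2) :
    PySem.Dict.getD (pvHitMap blob keyed) p false = pvF blob p := by
  unfold pvHitMap
  show PySem.Dict.getD (keyed.foldl (fun h kp =>
      kp.2.foldl (fun h p =>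
        if !(PySem.Dict.contains h p)
        then PySem.Dict.insert h p (pvF blob p) else h) h) PySem.Dict.empty) p false
    = pvF blob p
  have hc := pv_hitmap_contains blob keyed PySem.Dict.empty kp p hkp hp
  have hinv := pv_hitmap_inv blob keyed PySem.Dict.empty (by intro k b hk; simp [PySem.Dict.get?_empty] at hk)
  rw [PySem.Dict.contains_eq_isSome_get?] at hc
  obtain ⟨b, hb⟩ := Option.isSome_iff_exists.mp hc
  rw [PySem.Dict.getD_of_get?_eq_some _ _ hb]
  exact hinv p b hb

-- A's per-pii condition equals B's per-pii condition
theorem pv_cond_eq (detected_texts : List String) (expected_pii : List String) (pii : String)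
    (hpii : pii ∈ expected_pii) :
    ((PySem.Str.split₀ (PySem.Str.lower pii)).filter (fun part => decide (2 < PySem.Str.len part))).any
        (fun part => PySem.Str.isIn part (PySem.Str.lower (PySem.Str.join " " detected_texts)))
      = (pvParts pii).any (fun p =>
          PySem.Dict.getD (pvHitMap (PySem.Str.join " " (detected_texts.map PySem.Str.lower))
            (expected_pii.map (fun pii => (pii, pvParts pii)))) p false) := by
  rw [show ((PySem.Str.split₀ (PySem.Str.lower pii)).filter (fun part => decide (2 < PySem.Str.len part))) = pvParts pii from rfl]
  apply PySem.List.any_congr_mem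
  intro part hmem
  have hkp : (pii, pvParts pii) ∈ expected_pii.map (fun pii => (pii, pvParts pii)) :=
    List.mem_map.mpr ⟨pii, hpii, rfl⟩
  rw [pv_hitmap_getD _ _ _ part hkp hmem]
  unfold pvF
  rw [pv_blob_eq]

-- the accumulator loop is a partition into two filters
theorem pv_foldl_partition (h : String → Bool) (l : List String) (f0 m0 : List String) :
    l.foldl (fun (acc : List String × List String) pii =>
        if h pii then (acc.1 ++ [pii], acc.2) else (acc.1, acc.2 ++ [pii])) (f0, m0)
      = (f0 ++ l.filter h, m0 ++ l.filter (fun p => !(h p))) := by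
  induction l generalizing f0 m0 with
  | nil => simp
  | cons a tl ih =>
    by_cases ha : h a
    · simp [List.foldl_cons, ha, ih]
    · simp [List.foldl_cons, ha, ih]

-- ===== VERDICT (by name: the statement is the Claim_ definition above) =====
theorem count_pii_found_spec : Claim_equal_count_pii_found := by
  intro detected_texts expected_pii _
  unfold Spec_count_pii_found count_pii_found count_pii_found_alt
  simp only []
  rw [pv_foldl_partition]
  have h1 : ((expected_pii.map (fun pii => (pii, pvParts pii))).filter
        (fun kp => kp.2.any (fun p =>
          PySem.Dict.getD (pvHitMap (PySem.Str.join " " (detected_texts.map PySem.Str.lower))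
            (expected_pii.map (fun pii => (pii, pvParts pii)))) p false))).map Prod.fst
      = expected_pii.filter (fun pii =>
          ((PySem.Str.split₀ (PySem.Str.lower pii)).filter (fun part => decide (2 < PySem.Str.len part))).any
            (fun part => PySem.Str.isIn part (PySem.Str.lower (PySem.Str.join " " detected_texts)))) := by
    rw [List.filter_map, List.map_map]
    rw [show Prod.fst ∘ (fun pii => (pii, pvParts pii)) = id from rfl, List.map_id]
    apply List.filter_congr
    intro pii hpii
    simp only [Function.comp]
    exact (pv_cond_eq detected_texts expected_pii pii hpii).symm
  have h2 : ((expected_pii.map (fun pii => (pii, pvParts pii))).filter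
        (fun kp => !(kp.2.any (fun p =>
          PySem.Dict.getD (pvHitMap (PySem.Str.join " " (detected_texts.map PySem.Str.lower))
            (expected_pii.map (fun pii => (pii, pvParts pii)))) p false)))).map Prod.fst
      = expected_pii.filter (fun pii =>
          !(((PySem.Str.split₀ (PySem.Str.lower pii)).filter (fun part => decide (2 < PySem.Str.len part))).any
            (fun part => PySem.Str.isIn part (PySem.Str.lower (PySem.Str.join " " detected_texts))))) := by
    rw [List.filter_map, List.map_map]
    rw [show Prod.fst ∘ (fun pii => (pii, pvParts pii)) = id from rfl, List.map_id]
    apply List.filter_congr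
    intro pii hpii
    simp only [Function.comp]
    rw [pv_cond_eq detected_texts expected_pii pii hpii]
  rw [h1, h2]
  simp
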